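-- pv_equiv track=rewrite | github.com/uscnlp-lime/Inter-Intent | scripts/process_results_to_json.py | get_failure_rate
-- ===== SOURCE A (Python) =====
-- def get_failure_rate(results_data, evil_players):
--     total_vote = 0
--     fail_vote = 0
--     for val in results_data['team_quest_result'].values():
--         for p in evil_players:
--             if p in val:
--                 if val[p] == 'failure':
--                     fail_vote += 1
--                 total_vote += 1
--
--     return fail_vote, total_vote
-- ===== SOURCE B (Python) =====
-- def get_failure_rate(results_data, evil_players):
--     quests = list(results_data['team_quest_result'].values())
--     voters = [voter for val in quests for voter in val]
--     failers = [voter for val in quests for voter, vote in val.items() if vote == 'failure']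
--     fail_vote = sum(failers.count(p) for p in evil_players)
--     total_vote = sum(voters.count(p) for p in evil_players)
--     return fail_vote, total_vote
-- ===== Notes on version B (the rewrite author's own statement) =====
-- stated objective: alternative
-- what changed: B flattens all quests into two plain lists (all voter keys, and keys that voted 'failure') and computes each tally as a sum of list counts over evil_players, instead of A's running accumulator that probes every quest dict once per evil player.
import Mathlib
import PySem

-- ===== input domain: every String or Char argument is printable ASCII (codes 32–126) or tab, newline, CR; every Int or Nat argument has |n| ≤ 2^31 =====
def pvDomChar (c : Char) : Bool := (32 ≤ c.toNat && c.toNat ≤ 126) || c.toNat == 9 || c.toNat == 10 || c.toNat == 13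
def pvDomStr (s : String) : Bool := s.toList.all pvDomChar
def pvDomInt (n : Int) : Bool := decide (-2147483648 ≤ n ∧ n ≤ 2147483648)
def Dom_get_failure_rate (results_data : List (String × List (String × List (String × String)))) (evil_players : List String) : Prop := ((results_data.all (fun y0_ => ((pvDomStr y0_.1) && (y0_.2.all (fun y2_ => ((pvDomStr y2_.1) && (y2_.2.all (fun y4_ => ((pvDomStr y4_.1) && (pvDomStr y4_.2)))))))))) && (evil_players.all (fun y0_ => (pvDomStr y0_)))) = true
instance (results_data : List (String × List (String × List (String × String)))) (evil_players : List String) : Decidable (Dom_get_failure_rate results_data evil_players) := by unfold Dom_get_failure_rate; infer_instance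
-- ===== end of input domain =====

-- B replaces A's running-accumulator probe of each quest dict per evil player by flattening all
-- quests into two plain lists (voter keys / failure-voter keys) and summing list counts (alternative decomposition, same values).


-- ===== PORT A =====
-- state is (fail_vote, total_vote)
def get_failure_rate (results_data : List (String × List (String × List (String × String)))) (evil_players : List String) : Int × Int :=
  match (PySem.Dict.ofList results_data).get? "team_quest_result" with
  | none => (0, 0)  -- Python raises KeyError here; excluded by Pre_
  | some tqr =>
      (PySem.Dict.ofList tqr).values.foldl (fun (st : Int × Int) val =>
        evil_players.foldl (fun (st : Int × Int) p =>
          match (PySem.Dict.ofList val).get? p with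
          | some v => (if v = "failure" then st.1 + 1 else st.1, st.2 + 1)
          | none => st) st) ((0 : Int), (0 : Int))

-- ===== PORT B =====
def get_failure_rate_alt (results_data : List (String × List (String × List (String × String)))) (evil_players : List String) : Int × Int :=
  match (PySem.Dict.ofList results_data).get? "team_quest_result" with
  | none => (0, 0)  -- Python raises KeyError here; excluded by Pre_
  | some tqr =>
      let quests := (PySem.Dict.ofList tqr).values
      let voters := quests.flatMap (fun val => (PySem.Dict.ofList val).keys)
      let failers := quests.flatMap (fun val =>
        ((PySem.Dict.ofList val).items.filter (fun kv => kv.2 == "failure")).map Prod.fst)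
      ((evil_players.map (fun p => (failers.count p : Int))).sum,
       (evil_players.map (fun p => (voters.count p : Int))).sum)

-- ===== PRECONDITION & SPEC =====
-- Pre_ excludes exactly the inputs on which A raises KeyError: those without a 'team_quest_result' key (B raises there too).
def Pre_get_failure_rate (results_data : List (String × List (String × List (String × String)))) (_evil_players : List String) : Prop :=
  (PySem.Dict.ofList results_data).contains "team_quest_result" = true
instance (results_data : List (String × List (String × List (String × String)))) (evil_players : List String) : Decidable (Pre_get_failure_rate results_data evil_players) := by unfold Pre_get_failure_rate; infer_instance

def pvWitness_get_failure_rate : (List (String × List (String × List (String × String)))) × List String :=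
  ([("team_quest_result", [("quest_1", [("alice", "failure"), ("bob", "success")])])], ["alice"])

def Spec_get_failure_rate (results_data : List (String × List (String × List (String × String)))) (evil_players : List String) (out : Int × Int) : Prop := out = get_failure_rate_alt results_data evil_players
instance (results_data : List (String × List (String × List (String × String)))) (evil_players : List String) (out : Int × Int) : Decidable (Spec_get_failure_rate results_data evil_players out) := by unfold Spec_get_failure_rate; infer_instance

-- ===== CLAIM (what is proved, stated in full; the proofs are below) =====
def Claim_equal_get_failure_rate : Prop := ∀ (results_data : List (String × List (String × List (String × String)))) (evil_players : List String), Dom_get_failure_rate results_data evil_players → Pre_get_failure_rate results_data evil_players → Spec_get_failure_rate results_data evil_players (get_failure_rate results_data evil_players)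

-- ===== LEMMAS AND PROOFS =====

-- A's per-vote contributions, as functions of the quest dict and the probed player
def pvF (val : List (String × String)) (p : String) : Int :=
  match (PySem.Dict.ofList val).get? p with
  | some v => if v = "failure" then 1 else 0
  | none => 0
def pvG (val : List (String × String)) (p : String) : Int :=
  match (PySem.Dict.ofList val).get? p with
  | some _ => 1
  | none => 0

-- A's inner loop over evil_players, closed form
theorem pv_A_inner (evil : List String) (val : List (String × String)) (st : Int × Int) :
    evil.foldl (fun (st : Int × Int) p =>
        match (PySem.Dict.ofList val).get? p with
        | some v => (if v = "failure" then st.1 + 1 else st.1, st.2 + 1)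
        | none => st) st
    = (st.1 + (evil.map (pvF val)).sum, st.2 + (evil.map (pvG val)).sum) := by
  induction evil generalizing st with
  | nil => simp
  | cons p rest ih =>
    rw [List.foldl_cons, ih]
    simp only [pvF, pvG, List.map_cons, List.sum_cons]
    cases hq : (PySem.Dict.ofList val).get? p with
    | none => simp
    | some v =>
      simp only [Prod.mk.injEq]
      by_cases hv : v = "failure" <;> simp only [hv, reduceIte] <;> constructor <;> ring

-- A's outer loop over quests, closed form
theorem pv_A_outer (evil : List String) (vals : List (List (String × String))) (st : Int × Int) :
    vals.foldl (fun (st : Int × Int) val =>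
        evil.foldl (fun (st : Int × Int) p =>
          match (PySem.Dict.ofList val).get? p with
          | some v => (if v = "failure" then st.1 + 1 else st.1, st.2 + 1)
          | none => st) st) st
    = (st.1 + (vals.map (fun val => (evil.map (pvF val)).sum)).sum,
       st.2 + (vals.map (fun val => (evil.map (pvG val)).sum)).sum) := by
  induction vals generalizing st with
  | nil => simp
  | cons val rest ih =>
    rw [List.foldl_cons, pv_A_inner, ih]
    simp only [List.map_cons, List.sum_cons, Prod.mk.injEq]
    constructor <;> ring

-- double list sums commute
theorem pv_sum_swap {α β : Type} (f : α → β → Int) (l1 : List α) (l2 : List β) :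
    (l1.map (fun a => (l2.map (f a)).sum)).sum
      = (l2.map (fun b => (l1.map (fun a => f a b)).sum)).sum := by
  induction l1 with
  | nil =>
    simp only [List.map_nil, List.sum_nil]
    symm
    apply List.sum_eq_zero
    intro x hx
    simp only [List.mem_map] at hx
    obtain ⟨b, _, rfl⟩ := hx
    simp
  | cons a rest ih =>
    simp only [List.map_cons, List.sum_cons, ih, ← PySem.List.sum_map_add_int]

-- counting a key among a nodup-keyed pair list = A's membership indicator
theorem pv_count_fst (l : List (String × String)) (hnd : (l.map Prod.fst).Nodup) (p : String) :
    ((l.map Prod.fst).count p : Int)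
      = (match (PySem.Dict.mk l).get? p with | some _ => (1 : Int) | none => 0) := by
  induction l with
  | nil => simp [PySem.Dict.get?]
  | cons kv rest ih =>
    simp only [List.map_cons, List.nodup_cons] at hnd ⊢
    rw [PySem.Dict.get?_mk_cons]
    by_cases hk : kv.1 = p
    · subst hk
      have hz : (rest.map Prod.fst).count kv.1 = 0 := List.count_eq_zero_of_not_mem hnd.1
      simp [hz]
    · have hb : (kv.1 == p) = false := by simp [hk]
      have hb2 : (p == kv.1) = false := beq_eq_false_iff_ne.mpr (Ne.symm hk)
      simp only [List.count_cons, hb, Bool.false_eq_true, if_false, add_zero]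
      simpa using ih hnd.2

-- counting a key among the failure-voting pairs of a nodup-keyed list = A's failure indicator
theorem pv_count_fail (l : List (String × String)) (hnd : (l.map Prod.fst).Nodup) (p : String) :
    (((l.filter (fun kv => kv.2 == "failure")).map Prod.fst).count p : Int)
      = (match (PySem.Dict.mk l).get? p with
         | some v => if v = "failure" then (1 : Int) else 0
         | none => 0) := by
  induction l with
  | nil => simp [PySem.Dict.get?]
  | cons kv rest ih =>
    simp only [List.map_cons, List.nodup_cons] at hnd
    rw [PySem.Dict.get?_mk_cons, List.filter_cons]
    by_cases hk : kv.1 = p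
    · subst hk
      have hz : ((rest.filter (fun kv' => kv'.2 == "failure")).map Prod.fst).count kv.1 = 0 := by
        apply List.count_eq_zero_of_not_mem
        intro hm
        exact hnd.1 (by
          simp only [List.mem_map] at hm ⊢
          obtain ⟨kv', hkv', he⟩ := hm
          exact ⟨kv', (List.mem_filter.mp hkv').1, he⟩)
      by_cases hv : kv.2 = "failure"
      · simp [hv, hz]
      · have hbv : (kv.2 == "failure") = false := by simp [hv]
        simp [hbv, hv, hz]
    · have hb : (kv.1 == p) = false := by simp [hk]
      have hb2 : (p == kv.1) = false := beq_eq_false_iff_ne.mpr (Ne.symm hk)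
      by_cases hv : kv.2 = "failure"
      · have hbv : (kv.2 == "failure") = true := by simp [hv]
        simp only [hbv, if_true, List.map_cons, List.count_cons, hb,
          Bool.false_eq_true, if_false, add_zero]
        simpa using ih hnd.2
      · have hbv : (kv.2 == "failure") = false := by simp [hv]
        simp only [hbv, Bool.false_eq_true, if_false, hb]
        simpa using ih hnd.2

-- ===== VERDICT (by name: the statement is the Claim_ definition above) =====
theorem get_failure_rate_spec : Claim_equal_get_failure_rate := by
  intro results_data evil_players _ _
  unfold Spec_get_failure_rate get_failure_rate get_failure_rate_alt
  cases hk : (PySem.Dict.ofList results_data).get? "team_quest_result" with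
  | none => rfl
  | some tqr =>
    simp only []
    rw [pv_A_outer, zero_add, zero_add]
    refine Prod.ext ?_ ?_
    · simp only [List.count_flatMap, pv_sum_swap pvF]
      push_cast
      congr 1
      apply List.map_congr_left
      intro p _
      rw [List.map_map]
      congr 1
      apply List.map_congr_left
      intro val _
      have hnd : (((PySem.Dict.ofList val).items.map Prod.fst)).Nodup := PySem.Dict.nodup_keys_ofList val
      have := pv_count_fail (PySem.Dict.ofList val).items hnd p
      rw [show (PySem.Dict.mk (PySem.Dict.ofList val).items) = PySem.Dict.ofList val from rfl] at this
      simpa [pvF, Function.comp] using this.symm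
    · simp only [List.count_flatMap, pv_sum_swap pvG]
      push_cast
      congr 1
      apply List.map_congr_left
      intro p _
      rw [List.map_map]
      congr 1
      apply List.map_congr_left
      intro val _
      have hnd : (((PySem.Dict.ofList val).items.map Prod.fst)).Nodup := PySem.Dict.nodup_keys_ofList val
      have := pv_count_fst (PySem.Dict.ofList val).items hnd p
      rw [show (PySem.Dict.mk (PySem.Dict.ofList val).items) = PySem.Dict.ofList val from rfl] at this
      simpa [pvG, Function.comp] using this.symm
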